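-- pv_equiv track=rewrite | github.com/KingGodAGENT/python | Day19/review.py | solution
-- ===== SOURCE A (Python) =====
-- def solution(number):
--     a = ''
--     for index, item in enumerate(list(number)):
--         if len(number) - index <= 4: # 원래 숫자 나오기
--             a += item
--         else: # 맨처음부터 ~ 전체길이의 -4 까지
--             a += '*'
--     return a
-- ===== SOURCE B (Python) =====
-- def solution(number):
--     n = len(number)
--     return '*' * (n - 4) + ''.join(list(number)[-4:])
-- ===== Notes on version B (the rewrite author's own statement) =====
-- stated objective: simpler
-- what changed: Replaces the per-character loop (appending char or '*' depending on position) by a closed form: a star block of length n-4 via string repetition plus the joined last-four slice, avoiding O(n) one-character string concatenations.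
import Mathlib
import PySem

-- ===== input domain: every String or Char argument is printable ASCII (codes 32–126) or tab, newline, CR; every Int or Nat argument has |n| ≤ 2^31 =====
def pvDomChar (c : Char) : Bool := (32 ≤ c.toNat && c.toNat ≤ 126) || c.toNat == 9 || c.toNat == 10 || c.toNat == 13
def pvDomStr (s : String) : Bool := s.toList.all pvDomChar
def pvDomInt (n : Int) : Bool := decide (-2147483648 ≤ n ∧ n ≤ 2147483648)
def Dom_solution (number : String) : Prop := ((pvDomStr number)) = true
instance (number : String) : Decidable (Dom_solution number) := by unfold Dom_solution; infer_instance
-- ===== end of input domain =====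

-- B masks with a closed form (star block ++ last-four slice) instead of A's per-character loop; same value on every input.

-- ===== PORT A =====
-- a = ''; for index, item in enumerate(list(number)): a += item if len(number)-index <= 4 else '*'
def solution (number : String) : String :=
  let a : List Char :=
    (PySem.List.enumerate number.toList 0).foldl
      (fun a p => if PySem.Str.len number - p.1 ≤ 4 then a ++ [p.2] else a ++ ['*']) []
  String.ofList a

-- ===== PORT B =====
-- '*' * (n - 4) + ''.join(list(number)[-4:])
def solution_alt (number : String) : String :=
  let n : Int := PySem.Str.len number
  String.ofList (PySem.List.pyRepeat ['*'] (n - 4) ++ PySem.List.slice number.toList (some (-4)) none)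

-- ===== PRECONDITION & SPEC =====
def Spec_solution (number : String) (out : String) : Prop := out = solution_alt number
instance (number : String) (out : String) : Decidable (Spec_solution number out) := by unfold Spec_solution; infer_instance

-- ===== CLAIM (what is proved, stated in full; the proofs are below) =====
def Claim_equal_solution : Prop := ∀ (number : String), Dom_solution number → Spec_solution number (solution number)

-- ===== LEMMAS AND PROOFS =====

-- A's loop body as a structural recursion on the remaining characters, s = current index
def maskFrom (n : Int) : List Char → Int → List Char
  | [], _ => []
  | c :: cs, s => (if n - s ≤ 4 then c else '*') :: maskFrom n cs (s + 1)

theorem foldl_enum_mask (n : Int) (L : List Char) (s : Int) (acc : List Char) :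
    (PySem.List.enumerate L s).foldl
      (fun a p => if n - p.1 ≤ 4 then a ++ [p.2] else a ++ ['*']) acc
    = acc ++ maskFrom n L s := by
  induction L generalizing s acc with
  | nil => simp [PySem.List.enumerate_nil, maskFrom]
  | cons c cs ih =>
    rw [PySem.List.enumerate_cons, List.foldl_cons, ih]
    simp only [maskFrom]
    by_cases h : n - s ≤ 4 <;> simp [h]

theorem maskFrom_closed (n : Int) (L : List Char) (s : Int) :
    maskFrom n L s
    = List.replicate (min L.length (n - s - 4).toNat) '*' ++ L.drop (n - s - 4).toNat := by
  induction L generalizing s with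
  | nil => simp [maskFrom]
  | cons c cs ih =>
    simp only [maskFrom, ih]
    by_cases h : n - s ≤ 4
    · have h0 : (n - s - 4).toNat = 0 := by omega
      have h1 : (n - (s + 1) - 4).toNat = 0 := by omega
      simp [h, h0, h1]
    · have h0 : (n - s - 4).toNat = (n - (s + 1) - 4).toNat + 1 := by omega
      have hmin : min (c :: cs).length (n - s - 4).toNat
          = min cs.length (n - (s + 1) - 4).toNat + 1 := by
        simp only [List.length_cons]; omega
      simp [h, h0, List.replicate_succ]

theorem solution_spec : Claim_equal_solution := by
  intro number _
  unfold Spec_solution solution solution_alt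
  have hlen : PySem.Str.len number = (number.toList.length : Int) := by
    simp [PySem.Str.len]
  simp only [hlen, foldl_enum_mask, maskFrom_closed, List.nil_append,
    PySem.List.pyRepeat_singleton,
    PySem.List.slice_from_neg_ofNat number.toList 4 (by omega)]
  have h1 : ((number.toList.length : Int) - 0 - 4).toNat = number.toList.length - 4 := by omega
  have h2 : ((number.toList.length : Int) - 4).toNat = number.toList.length - 4 := by omega
  have h3 : min number.toList.length (number.toList.length - 4) = number.toList.length - 4 := by
    omega
  rw [h1, h2, h3]
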